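-- pv_equiv track=rewrite | github.com/rotifyld/2019l-computational-biology-intro | labs/01/h01.py | search_k
-- ===== SOURCE A (Python) =====
-- from typing import List, Set, Tuple
--
-- def kmers(s: str, k: int) -> Set[str]:
--     """
--     :return: Set of all k-mers of the sequence s
--     """
--     length = len(s)
--     return set([s[i:i + k] for i in range(length - k + 1)])
--
-- def split_by_uniqueness(sequences: List[str],
--                         indices_unique: Set[int],
--                         indices_not_unique: Set[int],
--                         k: int) \
--         -> Tuple[Set[int], Set[int]]:
--     """
--     Assuming `sequences` - a list of sequences that are divided into:
--         - sequences having unique m-mers (set of indices of such sequences: `indices_unique`),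
--         - sequences not having unique m-mers (set of indices of such sequences: `indices_not_unique`),
--     such that there exists integer m < `k`.
--
--     Splits `indices_not_unique` into two subsets:
--         - sequences having unique `k`-mers,
--         - sequences not having unique `k`-mers.
--     """
--     kmers_per_sequence = [kmers(s, k) for s in sequences]
--
--     # For performance reasons, to compute set of k-mers of all but one sequence.
--     kmers_checked = set()
--     for i in indices_unique:
--         kmers_checked.update(kmers_per_sequence[i])
--
--     # Returned values of split set.
--     # Their intersection is always empty.
--     # At the return their sum is equal to `indices_not_unique`.
--     unique = set()
--     not_unique = set()
--
--     for i in indices_not_unique: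
--
--         # set of k-mers of i-th sequence.
--         i_kmers = kmers_per_sequence[i]
--
--         # construct set of k-mers of all sequences but the i-th.
--         all_but_i_kmers = set(kmers_checked)
--         for j in indices_not_unique:
--             if j > i:
--                 all_but_i_kmers.update(kmers_per_sequence[j])
--
--         # compare above two sets and update
--         if i_kmers.issubset(all_but_i_kmers):
--             not_unique.add(i)
--         else:
--             unique.add(i)
--
--         kmers_checked.update(i_kmers)
--
--     return unique, not_unique
--
-- def search_k(sequences: List[str]) -> int:
--     """
--     Performs binary search in order to find smallest k satisfying the assignment condition.
--     """
--     num_sequences = len(sequences)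
--     shortest_sequence_length = min(map(len, sequences))
--
--     low = 1
--     high = shortest_sequence_length  # exclusive (upper bound)
--
--     # For performance reasons.
--     # For meaning, see: loop invariant.
--     not_unique_indices = set(range(num_sequences))
--     unique_indices = set()
--
--     # Binary search loop
--     while low < high:
--         # while loop invariants:
--         #   There does not exist a solution for problem of finding a set of probes of length `low - 1`
--         #   There exists a solution for problem of finding a set of probes of length `high`
--         #
--         #   `not_unique_indices` - set of indices such that sequence does not have unique k-mer of length `low - 1`
--         #   `unique_indices` - set of indices such that sequence has unique k-mer of length `low - 1`
--
--         mid = (low + high) // 2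
--         unique, not_unique = split_by_uniqueness(sequences, unique_indices, not_unique_indices, mid)
--
--         if len(not_unique) == 0:
--             high = mid
--         else:
--             low = mid + 1
--             unique_indices.update(unique)
--             not_unique_indices.difference_update(unique)
--
--     return low  # at this point, `low == high`
-- ===== SOURCE B (Python) =====
-- def search_k(sequences):
--     """
--     Same binary search over k, but each feasibility check is a single counting
--     pass: build one dict mapping each k-mer to the number of sequences owning
--     it; a sequence has a unique k-mer iff one of its k-mers has count 1.
--     Replaces A's per-sequence union of all other sequences' k-mer sets.
--     """
--     low = 1
--     high = min(len(s) for s in sequences)  # exclusive upper bound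
--
--     # indices of sequences not yet known to have a unique (low-1)-mer
--     pending = list(range(len(sequences)))
--
--     while low < high:
--         mid = (low + high) // 2
--
--         kmer_sets = [{s[j:j + mid] for j in range(len(s) - mid + 1)}
--                      for s in sequences]
--
--         count = {}
--         for ks in kmer_sets:
--             for m in ks:
--                 count[m] = count.get(m, 0) + 1
--
--         still = [i for i in pending
--                  if all(count[m] > 1 for m in kmer_sets[i])]
--
--         if not still:
--             high = mid
--         else:
--             low = mid + 1
--             pending = still
--
--     return low
-- ===== Notes on version B (the rewrite author's own statement) =====
-- stated objective: faster
-- what changed: Each binary-search feasibility check now builds one k-mer -> owning-sequence-count dict in a single pass and calls a sequence unique iff it owns a count-1 k-mer, instead of re-building the union of all other sequences' k-mer sets for every candidate sequence; the unique/not-unique index-set bookkeeping collapses to one pending list.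
-- outside the precondition, e.g. on search_k([]): A raises ValueError, B raises ValueError
import Mathlib
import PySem

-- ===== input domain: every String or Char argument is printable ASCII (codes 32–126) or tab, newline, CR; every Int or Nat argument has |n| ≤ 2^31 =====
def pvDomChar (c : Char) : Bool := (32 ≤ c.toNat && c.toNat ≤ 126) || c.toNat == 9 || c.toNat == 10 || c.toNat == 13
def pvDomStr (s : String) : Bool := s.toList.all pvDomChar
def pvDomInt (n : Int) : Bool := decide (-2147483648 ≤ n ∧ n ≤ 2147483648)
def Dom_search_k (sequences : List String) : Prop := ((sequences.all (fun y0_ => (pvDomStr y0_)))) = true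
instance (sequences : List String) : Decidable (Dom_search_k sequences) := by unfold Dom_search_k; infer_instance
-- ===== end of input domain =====

-- B replaces A's per-sequence union of all the other sequences' k-mer sets by one global
-- k-mer → owning-sequence-count dict per feasibility check (measured faster; same results).

-- ===== PORT A =====
-- kmers(s, k): set of all k-length slices of s
def pvKmers (s : String) (k : Int) : PySem.Set String :=
  PySem.Set.ofList ((PySem.List.pyRange 0 (PySem.Str.len s - k + 1)).map
    (fun i => PySem.Str.slice s (some i) (some (i + k))))

-- body of A's "for i in indices_not_unique" loop in split_by_uniqueness;
-- state = (unique, not_unique, kmers_checked).  List indexing kmers_per_sequence[i]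
-- is ported as pyGetD (exact here: every index used is in range, so Python never raises).
def pvSplitStep (kps : List (PySem.Set String)) (indices_not_unique : PySem.Set Int)
    (st : PySem.Set Int × PySem.Set Int × PySem.Set String) (i : Int) :
    PySem.Set Int × PySem.Set Int × PySem.Set String :=
  let i_kmers := PySem.List.pyGetD kps i PySem.Set.empty
  let all_but_i_kmers := indices_not_unique.foldl
    (fun acc j => if i < j then acc.update (PySem.List.pyGetD kps j PySem.Set.empty) else acc)
    st.2.2
  if i_kmers.issubset all_but_i_kmers then
    (st.1, st.2.1.add i, st.2.2.update i_kmers)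
  else
    (st.1.add i, st.2.1, st.2.2.update i_kmers)

-- split_by_uniqueness.  CPython iterates these sets of small ints (0..n-1) in ascending
-- order; the Set lists maintained by this port are in exactly that order.
def pvSplit (sequences : List String) (indices_unique indices_not_unique : PySem.Set Int)
    (k : Int) : PySem.Set Int × PySem.Set Int :=
  let kmers_per_sequence := sequences.map (fun s => pvKmers s k)
  let kmers_checked := indices_unique.foldl
    (fun acc i => acc.update (PySem.List.pyGetD kmers_per_sequence i PySem.Set.empty))
    PySem.Set.empty
  let st := indices_not_unique.foldl (pvSplitStep kmers_per_sequence indices_not_unique)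
    (PySem.Set.empty, PySem.Set.empty, kmers_checked)
  (st.1, st.2.1)

-- A's binary-search loop ("while low < high")
def pvLoopA (sequences : List String) (unique_indices not_unique_indices : PySem.Set Int)
    (low high : Int) : Int :=
  if h : low < high then
    let mid := PySem.Int.floordiv (low + high) 2
    let p := pvSplit sequences unique_indices not_unique_indices mid
    if p.2.len = 0 then
      pvLoopA sequences unique_indices not_unique_indices low mid
    else
      pvLoopA sequences (unique_indices.update p.1) (not_unique_indices.diff p.1) (mid + 1) high
  else low
termination_by (high - low).toNat
decreasing_by
  · have hlt : PySem.Int.floordiv (low + high) 2 < high :=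
      (PySem.Int.floordiv_lt_iff_lt_mul (by norm_num)).mpr (by omega)
    omega
  · have hb := PySem.Int.floordiv_two_mid_bounds (le_of_lt h)
    omega

def search_k (sequences : List String) : Int :=
  match PySem.List.min? (sequences.map PySem.Str.len) (fun x => x) with
  | none => 0  -- Python raises ValueError on an empty list; excluded by Pre_search_k
  | some shortest_sequence_length =>
    pvLoopA sequences PySem.Set.empty
      (PySem.Set.ofList (PySem.List.pyRange 0 (sequences.length : Int)))
      1 shortest_sequence_length

-- ===== PORT B =====
-- owning-sequence count: for ks in kmer_sets: for m in ks: count[m] = count.get(m, 0) + 1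
def pvCount (kmer_sets : List (PySem.Set String)) : PySem.Dict String Int :=
  kmer_sets.foldl (fun d ks => ks.foldl (fun d m => d.insert m (d.getD m 0 + 1)) d)
    PySem.Dict.empty

-- B's binary-search loop on the plain list `pending`
def pvLoopB (sequences : List String) (pending : List Int) (low high : Int) : Int :=
  if h : low < high then
    let mid := PySem.Int.floordiv (low + high) 2
    let kmer_sets := sequences.map (fun s => pvKmers s mid)
    let count := pvCount kmer_sets
    let still := pending.filter (fun i =>
      (PySem.List.pyGetD kmer_sets i PySem.Set.empty).all (fun m => decide (1 < count.getD m 0)))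
    if still.isEmpty then
      pvLoopB sequences pending low mid
    else
      pvLoopB sequences still (mid + 1) high
  else low
termination_by (high - low).toNat
decreasing_by
  · have hlt : PySem.Int.floordiv (low + high) 2 < high :=
      (PySem.Int.floordiv_lt_iff_lt_mul (by norm_num)).mpr (by omega)
    omega
  · have hb := PySem.Int.floordiv_two_mid_bounds (le_of_lt h)
    omega

def search_k_alt (sequences : List String) : Int :=
  match PySem.List.min? (sequences.map PySem.Str.len) (fun x => x) with
  | none => 0  -- Python raises ValueError on an empty list; excluded by Pre_search_k
  | some shortest =>
    pvLoopB sequences (PySem.List.pyRange 0 (sequences.length : Int)) 1 shortest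

-- ===== PRECONDITION & SPEC =====
-- Python A raises ValueError (min() of an empty iterable) on []; that is the only excluded input.
def Pre_search_k (sequences : List String) : Prop := sequences ≠ []
instance (sequences : List String) : Decidable (Pre_search_k sequences) := by
  unfold Pre_search_k; infer_instance
def pvWitness_search_k : List String := ["ab", "ba"]
def Spec_search_k (sequences : List String) (out : Int) : Prop := out = search_k_alt sequences
instance (sequences : List String) (out : Int) : Decidable (Spec_search_k sequences out) := by
  unfold Spec_search_k; infer_instance

-- ===== CLAIM (what is proved, stated in full; the proofs are below) =====
def Claim_equal_search_k : Prop := ∀ (sequences : List String), Dom_search_k sequences → Pre_search_k sequences → Spec_search_k sequences (search_k sequences)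

-- ===== LEMMAS AND PROOFS =====

def pvShared (kps : List (PySem.Set String)) (i : Int) : Prop :=
  ∀ m ∈ PySem.List.pyGetD kps i PySem.Set.empty,
    ∃ j : Int, 0 ≤ j ∧ j < (kps.length : Int) ∧ j ≠ i ∧
      m ∈ PySem.List.pyGetD kps j PySem.Set.empty

def pvDecB (kps : List (PySem.Set String)) (i : Int) : Bool :=
  (PySem.List.pyGetD kps i PySem.Set.empty).all
    (fun m => decide (1 < (pvCount kps).getD m 0))

theorem pv_count_aux (kps : List (PySem.Set String)) (hnd : ∀ ks ∈ kps, ks.Nodup)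
    (m : String) :
    ∀ d : PySem.Dict String Int,
    (kps.foldl (fun d ks => ks.foldl (fun d m => d.insert m (d.getD m 0 + 1)) d) d).getD m 0
      = d.getD m 0 + ((kps.countP (fun ks => decide (m ∈ ks)) : Nat) : Int) := by
  induction kps with
  | nil => simp
  | cons ks t ih =>
    intro d
    simp only [List.foldl_cons, List.countP_cons]
    rw [ih (fun x hx => hnd x (List.mem_cons_of_mem _ hx)),
      PySem.Dict.getD_foldl_insert_add_one]
    by_cases hm : m ∈ ks
    · rw [List.count_eq_one_of_mem (hnd ks List.mem_cons_self) hm]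
      simp [hm]; ring
    · rw [List.count_eq_zero.mpr hm]
      simp [hm]

theorem pv_count_getD (kps : List (PySem.Set String)) (hnd : ∀ ks ∈ kps, ks.Nodup)
    (m : String) :
    (pvCount kps).getD m 0 = ((kps.countP (fun ks => decide (m ∈ ks)) : Nat) : Int) := by
  rw [pvCount, pv_count_aux kps hnd m]; simp

theorem pv_two_le_countP {α : Type} (l : List α) (p : α → Bool) (i : Nat) (hi : i < l.length)
    (hp : p (l[i]'hi) = true) :
    2 ≤ l.countP p ↔ ∃ j : Nat, ∃ hj : j < l.length, j ≠ i ∧ p (l[j]'hj) = true := by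
  have hd : l.drop i = l[i] :: l.drop (i+1) := List.drop_eq_getElem_cons hi
  have hsum : l.countP p = (l.take i).countP p + (l.drop i).countP p := by
    rw [← List.countP_append, List.take_append_drop]
  rw [hd, List.countP_cons] at hsum
  simp only [hp, if_pos] at hsum
  constructor
  · intro h2
    have hor : 0 < (l.take i).countP p ∨ 0 < (l.drop (i+1)).countP p := by omega
    rcases hor with h | h
    · obtain ⟨a, ha, hpa⟩ := List.countP_pos_iff.mp h
      obtain ⟨j, hj, rfl⟩ := List.mem_iff_getElem.mp ha
      have hjl : j < i ∧ j < l.length := by simpa using hj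
      refine ⟨j, by omega, by omega, ?_⟩
      rwa [List.getElem_take] at hpa
    · obtain ⟨a, ha, hpa⟩ := List.countP_pos_iff.mp h
      obtain ⟨j, hj, rfl⟩ := List.mem_iff_getElem.mp ha
      have hjl : i + 1 + j < l.length := by simp at hj; omega
      refine ⟨i + 1 + j, hjl, by omega, ?_⟩
      rwa [List.getElem_drop] at hpa
  · rintro ⟨j, hj, hne, hpj⟩
    rcases Nat.lt_or_ge j i with hlt | hge
    · have h1 : 0 < (l.take i).countP p := by
        apply List.countP_pos_iff.mpr
        refine ⟨(l.take i)[j]'(by simp; omega), List.getElem_mem _, ?_⟩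
        rwa [List.getElem_take]
      omega
    · have hgt : i + 1 ≤ j := by omega
      have h1 : 0 < (l.drop (i+1)).countP p := by
        apply List.countP_pos_iff.mpr
        refine ⟨(l.drop (i+1))[j - (i+1)]'(by simp; omega), List.getElem_mem _, ?_⟩
        rw [List.getElem_drop]
        have : i + 1 + (j - (i + 1)) = j := by omega
        simp_rw [this]; exact hpj
      omega

theorem pv_getD_int (kps : List (PySem.Set String)) (j : Int) (h0 : 0 ≤ j)
    (hj : j < (kps.length : Int)) :
    PySem.List.pyGetD kps j PySem.Set.empty = kps[j.toNat]'(by omega) := by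
  rw [PySem.List.pyGetD_of_nonneg _ _ h0, List.getD_eq_getElem]

theorem pv_decB_iff (kps : List (PySem.Set String)) (hnd : ∀ ks ∈ kps, ks.Nodup)
    (i : Int) (h0 : 0 ≤ i) (hi : i < (kps.length : Int)) :
    pvDecB kps i = true ↔ pvShared kps i := by
  have hiN : i.toNat < kps.length := by omega
  rw [pvDecB, pvShared, List.all_eq_true]
  rw [pv_getD_int kps i h0 hi]
  constructor
  · intro h m hm
    have hcnt := h m hm
    rw [decide_eq_true_iff, pv_count_getD kps hnd m] at hcnt
    have h2 : 2 ≤ kps.countP (fun ks => decide (m ∈ ks)) := by omega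
    obtain ⟨j, hj, hne, hpj⟩ := (pv_two_le_countP kps _ i.toNat hiN (by simpa using hm)).mp h2
    refine ⟨(j : Int), by omega, by omega, ?_, ?_⟩
    · intro heq; apply hne; omega
    · rw [pv_getD_int kps (j : Int) (by omega) (by omega)]
      simpa using hpj
  · intro h m hm
    have hsh := h m hm
    rw [decide_eq_true_iff, pv_count_getD kps hnd m]
    obtain ⟨j, hj0, hjl, hne, hmem⟩ := hsh
    have h2 : 2 ≤ kps.countP (fun ks => decide (m ∈ ks)) := by
      apply (pv_two_le_countP kps _ i.toNat hiN (by simpa using hm)).mpr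
      refine ⟨j.toNat, by omega, by omega, ?_⟩
      rw [pv_getD_int kps j hj0 hjl] at hmem
      simpa using hmem
    omega

theorem pv_mem_foldl_update (L : List Int) (c : Int → Prop) [DecidablePred c]
    (f : Int → PySem.Set String) (m : String) :
    ∀ a : PySem.Set String,
    (m ∈ L.foldl (fun acc j => if c j then acc.update (f j) else acc) a) ↔
      m ∈ a ∨ ∃ j ∈ L, c j ∧ m ∈ f j := by
  induction L with
  | nil => simp
  | cons x t ih =>
    intro a
    simp only [List.foldl_cons]
    by_cases hc : c x
    · rw [if_pos hc, ih, PySem.Set.mem_update]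
      constructor
      · rintro (( h | h) | ⟨j, hj, hcj, hm⟩)
        · exact Or.inl h
        · exact Or.inr ⟨x, List.mem_cons_self, hc, h⟩
        · exact Or.inr ⟨j, List.mem_cons_of_mem _ hj, hcj, hm⟩
      · rintro (h | ⟨j, hj, hcj, hm⟩)
        · exact Or.inl (Or.inl h)
        · rcases List.mem_cons.mp hj with rfl | hj
          · exact Or.inl (Or.inr hm)
          · exact Or.inr ⟨j, hj, hcj, hm⟩
    · rw [if_neg hc, ih]
      constructor
      · rintro (h | ⟨j, hj, hcj, hm⟩)
        · exact Or.inl h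
        · exact Or.inr ⟨j, List.mem_cons_of_mem _ hj, hcj, hm⟩
      · rintro (h | ⟨j, hj, hcj, hm⟩)
        · exact Or.inl h
        · rcases List.mem_cons.mp hj with rfl | hj
          · exact absurd hcj hc
          · exact Or.inr ⟨j, hj, hcj, hm⟩

theorem pv_mem_foldl_update' (L : List Int) (f : Int → PySem.Set String) (m : String) :
    ∀ a : PySem.Set String,
    (m ∈ L.foldl (fun acc j => acc.update (f j)) a) ↔ m ∈ a ∨ ∃ j ∈ L, m ∈ f j := by
  induction L with
  | nil => simp
  | cons x t ih =>
    intro a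
    simp only [List.foldl_cons]
    rw [ih, PySem.Set.mem_update]
    constructor
    · rintro ((h | h) | ⟨j, hj, hm⟩)
      · exact Or.inl h
      · exact Or.inr ⟨x, List.mem_cons_self, h⟩
      · exact Or.inr ⟨j, List.mem_cons_of_mem _ hj, hm⟩
    · rintro (h | ⟨j, hj, hm⟩)
      · exact Or.inl (Or.inl h)
      · rcases List.mem_cons.mp hj with rfl | hj
        · exact Or.inl (Or.inr hm)
        · exact Or.inr ⟨j, hj, hm⟩

theorem pv_splitA_decision (kps : List (PySem.Set String)) (U : PySem.Set Int)
    (full Pl S : List Int) (i : Int) (kchk : PySem.Set String)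
    (hfull : full = Pl ++ i :: S) (hsort : full.Pairwise (· < ·))
    (hbound : ∀ j ∈ full, 0 ≤ j ∧ j < (kps.length : Int))
    (hU : ∀ j ∈ U, 0 ≤ j ∧ j < (kps.length : Int) ∧ j ∉ full)
    (hpart : ∀ j : Int, 0 ≤ j → j < (kps.length : Int) → j ∈ U ∨ j ∈ full)
    (hk : ∀ m, m ∈ kchk ↔ (∃ j ∈ U, m ∈ PySem.List.pyGetD kps j PySem.Set.empty) ∨
      (∃ j ∈ Pl, m ∈ PySem.List.pyGetD kps j PySem.Set.empty)) :
    ((PySem.List.pyGetD kps i PySem.Set.empty).issubset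
      ((PySem.Set.ofList full).foldl
        (fun acc j => if i < j then acc.update (PySem.List.pyGetD kps j PySem.Set.empty) else acc)
        kchk) = true) ↔ pvShared kps i := by
  have hnodup : full.Nodup := hsort.imp ne_of_lt
  have hps := List.pairwise_append.mp (hfull ▸ hsort)
  have hPl_lt : ∀ j ∈ Pl, j < i := fun j hj => hps.2.2 j hj i List.mem_cons_self
  have hS_gt : ∀ j ∈ S, i < j := (List.pairwise_cons.mp hps.2.1).1
  have hi_mem : i ∈ full := hfull ▸ List.mem_append_right _ List.mem_cons_self
  rw [PySem.Set.ofList_eq_self_of_nodup full hnodup, PySem.Set.issubset_iff, pvShared]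
  constructor
  · intro h m hm
    have := h m hm
    rw [pv_mem_foldl_update full (fun j => i < j) _ m kchk, hk] at this
    rcases this with (⟨j, hj, hmj⟩ | ⟨j, hj, hmj⟩) | ⟨j, hj, hij, hmj⟩
    · obtain ⟨hj0, hjl, hjnf⟩ := hU j hj
      exact ⟨j, hj0, hjl, fun he => hjnf (he ▸ hi_mem), hmj⟩
    · obtain ⟨hj0, hjl⟩ := hbound j (hfull ▸ List.mem_append_left _ hj)
      exact ⟨j, hj0, hjl, ne_of_lt (hPl_lt j hj), hmj⟩
    · obtain ⟨hj0, hjl⟩ := hbound j hj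
      exact ⟨j, hj0, hjl, (ne_of_lt hij).symm, hmj⟩
  · intro h m hm
    obtain ⟨j, hj0, hjl, hne, hmj⟩ := h m hm
    rw [pv_mem_foldl_update full (fun j => i < j) _ m kchk, hk]
    rcases hpart j hj0 hjl with hjU | hjF
    · exact Or.inl (Or.inl ⟨j, hjU, hmj⟩)
    · rcases List.mem_append.mp (hfull ▸ hjF) with hjPl | hjiS
      · exact Or.inl (Or.inr ⟨j, hjPl, hmj⟩)
      · rcases List.mem_cons.mp hjiS with rfl | hjS
        · exact absurd rfl hne
        · exact Or.inr ⟨j, hjF, hS_gt j hjS, hmj⟩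

theorem pv_splitfold (kps : List (PySem.Set String)) (U : PySem.Set Int) (full : List Int)
    (hsort : full.Pairwise (· < ·))
    (hbound : ∀ j ∈ full, 0 ≤ j ∧ j < (kps.length : Int))
    (hU : ∀ j ∈ U, 0 ≤ j ∧ j < (kps.length : Int) ∧ j ∉ full)
    (hpart : ∀ j : Int, 0 ≤ j → j < (kps.length : Int) → j ∈ U ∨ j ∈ full)
    (hnd : ∀ ks ∈ kps, ks.Nodup) :
    ∀ (S Pl : List Int) (kchk : PySem.Set String),
      full = Pl ++ S →
      (∀ m, m ∈ kchk ↔ (∃ j ∈ U, m ∈ PySem.List.pyGetD kps j PySem.Set.empty) ∨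
        (∃ j ∈ Pl, m ∈ PySem.List.pyGetD kps j PySem.Set.empty)) →
      (S.foldl (pvSplitStep kps (PySem.Set.ofList full))
        (Pl.filter (fun x => !pvDecB kps x), Pl.filter (fun x => pvDecB kps x), kchk)).1
          = full.filter (fun x => !pvDecB kps x) ∧
      (S.foldl (pvSplitStep kps (PySem.Set.ofList full))
        (Pl.filter (fun x => !pvDecB kps x), Pl.filter (fun x => pvDecB kps x), kchk)).2.1
          = full.filter (fun x => pvDecB kps x) := by
  intro S
  induction S with
  | nil =>
    intro Pl kchk hfull hk
    simp only [List.foldl_nil]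
    rw [hfull, List.append_nil]
    exact ⟨rfl, rfl⟩
  | cons i S' ih =>
    intro Pl kchk hfull hk
    have hips := List.pairwise_append.mp (hfull ▸ hsort)
    have hPl_lt : ∀ j ∈ Pl, j < i := fun j hj => hips.2.2 j hj i List.mem_cons_self
    have hiPl : i ∉ Pl := fun hin => lt_irrefl i (hPl_lt i hin)
    have hib := hbound i (hfull ▸ List.mem_append_right _ List.mem_cons_self)
    have hcond : ((PySem.List.pyGetD kps i PySem.Set.empty).issubset
        ((PySem.Set.ofList full).foldl
          (fun acc j => if i < j then acc.update (PySem.List.pyGetD kps j PySem.Set.empty) else acc)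
          kchk)) = pvDecB kps i := by
      rw [Bool.eq_iff_iff]
      rw [pv_splitA_decision kps U full Pl S' i kchk hfull hsort hbound hU hpart hk]
      exact (pv_decB_iff kps hnd i hib.1 hib.2).symm
    simp only [List.foldl_cons, pvSplitStep, hcond]
    by_cases hdec : pvDecB kps i = true
    · rw [if_pos hdec]
      have hstate :
          (Pl.filter (fun x => !pvDecB kps x),
            PySem.Set.add (Pl.filter (fun x => pvDecB kps x)) i,
            kchk.update (PySem.List.pyGetD kps i PySem.Set.empty)) =
          ((Pl ++ [i]).filter (fun x => !pvDecB kps x),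
            (Pl ++ [i]).filter (fun x => pvDecB kps x),
            kchk.update (PySem.List.pyGetD kps i PySem.Set.empty)) := by
        rw [List.filter_append, List.filter_append]
        simp only [List.filter_cons, List.filter_nil, hdec]
        rw [PySem.Set.add_of_not_mem (fun hin => hiPl (List.mem_of_mem_filter hin))]
        simp
      rw [hstate]
      apply ih (Pl ++ [i])
      · rw [hfull, List.append_assoc]; rfl
      · intro m
        rw [PySem.Set.mem_update, hk m]
        constructor
        · rintro ((h | ⟨j, hj, hm⟩) | h)
          · exact Or.inl h
          · exact Or.inr ⟨j, List.mem_append_left _ hj, hm⟩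
          · exact Or.inr ⟨i, List.mem_append_right _ List.mem_cons_self, h⟩
        · rintro (h | ⟨j, hj, hm⟩)
          · exact Or.inl (Or.inl h)
          · rcases List.mem_append.mp hj with hj | hj
            · exact Or.inl (Or.inr ⟨j, hj, hm⟩)
            · rcases List.mem_cons.mp hj with rfl | h'
              · exact Or.inr hm
              · exact absurd h' (List.not_mem_nil)
    · rw [if_neg hdec]
      have hdec' : pvDecB kps i = false := by
        cases h : pvDecB kps i
        · rfl
        · exact absurd h hdec
      have hstate :
          (PySem.Set.add (Pl.filter (fun x => !pvDecB kps x)) i,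
            Pl.filter (fun x => pvDecB kps x),
            kchk.update (PySem.List.pyGetD kps i PySem.Set.empty)) =
          ((Pl ++ [i]).filter (fun x => !pvDecB kps x),
            (Pl ++ [i]).filter (fun x => pvDecB kps x),
            kchk.update (PySem.List.pyGetD kps i PySem.Set.empty)) := by
        rw [List.filter_append, List.filter_append]
        simp only [List.filter_cons, List.filter_nil, hdec', Bool.not_false]
        rw [PySem.Set.add_of_not_mem (fun hin => hiPl (List.mem_of_mem_filter hin))]
        simp
      rw [hstate]
      apply ih (Pl ++ [i])
      · rw [hfull, List.append_assoc]; rfl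
      · intro m
        rw [PySem.Set.mem_update, hk m]
        constructor
        · rintro ((h | ⟨j, hj, hm⟩) | h)
          · exact Or.inl h
          · exact Or.inr ⟨j, List.mem_append_left _ hj, hm⟩
          · exact Or.inr ⟨i, List.mem_append_right _ List.mem_cons_self, h⟩
        · rintro (h | ⟨j, hj, hm⟩)
          · exact Or.inl (Or.inl h)
          · rcases List.mem_append.mp hj with hj | hj
            · exact Or.inl (Or.inr ⟨j, hj, hm⟩)
            · rcases List.mem_cons.mp hj with rfl | h'
              · exact Or.inr hm
              · exact absurd h' (List.not_mem_nil)

theorem pv_split_eq (sequences : List String) (U : PySem.Set Int) (full : List Int) (mid : Int)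
    (hsort : full.Pairwise (· < ·))
    (hbound : ∀ j ∈ full, 0 ≤ j ∧ j < (sequences.length : Int))
    (hU : ∀ j ∈ U, 0 ≤ j ∧ j < (sequences.length : Int) ∧ j ∉ full)
    (hpart : ∀ j : Int, 0 ≤ j → j < (sequences.length : Int) → j ∈ U ∨ j ∈ full) :
    pvSplit sequences U (PySem.Set.ofList full) mid =
      (full.filter (fun i => !pvDecB (sequences.map (fun s => pvKmers s mid)) i),
       full.filter (fun i => pvDecB (sequences.map (fun s => pvKmers s mid)) i)) := by
  have hnodup : full.Nodup := hsort.imp ne_of_lt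
  have hof : PySem.Set.ofList full = full := PySem.Set.ofList_eq_self_of_nodup full hnodup
  set kps := sequences.map (fun s => pvKmers s mid) with hkps
  have hlen : (kps.length : Int) = (sequences.length : Int) := by simp [hkps]
  have hnd : ∀ ks ∈ kps, ks.Nodup := by
    intro ks hks
    rw [hkps] at hks
    obtain ⟨s, _, rfl⟩ := List.mem_map.mp hks
    exact PySem.Set.nodup_ofList _
  have hchar : ∀ m, m ∈ (U.foldl
      (fun acc i => acc.update (PySem.List.pyGetD kps i PySem.Set.empty)) PySem.Set.empty) ↔
      (∃ j ∈ U, m ∈ PySem.List.pyGetD kps j PySem.Set.empty) ∨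
      (∃ j ∈ ([] : List Int), m ∈ PySem.List.pyGetD kps j PySem.Set.empty) := by
    intro m
    rw [pv_mem_foldl_update' U (fun j => PySem.List.pyGetD kps j PySem.Set.empty) m]
    simp [PySem.Set.empty]
  have hsf := pv_splitfold kps U full hsort (hlen ▸ hbound) (hlen ▸ hU) (hlen ▸ hpart) hnd
    full [] _ rfl hchar
  simp only [pvSplit]
  rw [hof]
  rw [hof] at hsf
  have h1 := hsf.1
  have h2 := hsf.2
  simp only [List.filter_nil] at h1 h2
  rw [← hkps] at *
  exact Prod.ext (by rw [← h1]; rfl) (by rw [← h2]; rfl)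

theorem pv_loop_eq (sequences : List String) :
    ∀ (fuel : Nat) (low high : Int) (U : PySem.Set Int) (full : List Int),
      (high - low).toNat ≤ fuel →
      full.Pairwise (· < ·) →
      (∀ j ∈ full, 0 ≤ j ∧ j < (sequences.length : Int)) →
      (∀ j ∈ U, 0 ≤ j ∧ j < (sequences.length : Int) ∧ j ∉ full) →
      (∀ j : Int, 0 ≤ j → j < (sequences.length : Int) → j ∈ U ∨ j ∈ full) →
      pvLoopA sequences U (PySem.Set.ofList full) low high = pvLoopB sequences full low high := by
  intro fuel
  induction fuel with
  | zero =>
    intro low high U full hf hsort hbound hU hpart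
    have hnl : ¬ low < high := by omega
    rw [pvLoopA, pvLoopB]
    simp [hnl]
  | succ fuel ih =>
    intro low high U full hf hsort hbound hU hpart
    have hnodup : full.Nodup := hsort.imp ne_of_lt
    have hof : PySem.Set.ofList full = full := PySem.Set.ofList_eq_self_of_nodup full hnodup
    rw [pvLoopA, pvLoopB]
    by_cases h : low < high
    · simp only [dif_pos h]
      have hb := PySem.Int.floordiv_two_mid_bounds (le_of_lt h)
      have hlt : PySem.Int.floordiv (low + high) 2 < high :=
        (PySem.Int.floordiv_lt_iff_lt_mul (by norm_num)).mpr (by omega)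
      set mid := PySem.Int.floordiv (low + high) 2 with hmid
      set kps := sequences.map (fun s => pvKmers s mid) with hkps
      rw [pv_split_eq sequences U full mid hsort hbound hU hpart]
      rw [← hkps]
      have hstill : full.filter (fun i =>
          (PySem.List.pyGetD kps i PySem.Set.empty).all
            (fun m => decide (1 < (pvCount kps).getD m 0))) =
          full.filter (fun i => pvDecB kps i) := rfl
      simp only [hstill]
      have hdiff : (PySem.Set.ofList full).diff (full.filter (fun i => !pvDecB kps i)) =
          PySem.Set.ofList (full.filter (fun i => pvDecB kps i)) := by
        rw [hof, PySem.Set.diff.eq_1,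
          PySem.Set.ofList_eq_self_of_nodup _ (hnodup.filter _)]
        apply List.filter_congr
        intro x hx
        rw [PySem.Set.contains_eq_decide]
        by_cases hd : pvDecB kps x = true
        · simp [hd, List.mem_filter, hx]
        · simp only [Bool.not_eq_true] at hd
          simp [hd, List.mem_filter, hx]
      by_cases he : (full.filter (fun i => pvDecB kps i)).isEmpty = true
      · have hlen0 : (PySem.Set.len (α := Int) (full.filter (fun i => pvDecB kps i))) = 0 := by
          rw [PySem.Set.len_eq]
          simp only [List.isEmpty_iff] at he
          simp [he]
        rw [if_pos hlen0, if_pos he]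
        exact ih low mid U full (by omega) hsort hbound hU hpart
      · have hlen0 : ¬ (PySem.Set.len (α := Int) (full.filter (fun i => pvDecB kps i))) = 0 := by
          rw [PySem.Set.len_eq]
          simp only [List.isEmpty_iff] at he
          simpa using he
        rw [if_neg hlen0, if_neg he, hdiff]
        refine ih (mid + 1) high (U.update (full.filter (fun i => !pvDecB kps i)))
          (full.filter (fun i => pvDecB kps i)) (by omega)
          (hsort.sublist (List.filter_sublist ..))
          (fun j hj => hbound j (List.mem_of_mem_filter hj)) ?_ ?_
        · -- hU'
          intro j hj
          rw [PySem.Set.mem_update] at hj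
          rcases hj with hj | hj
          · obtain ⟨h1, h2, h3⟩ := hU j hj
            exact ⟨h1, h2, fun hin => h3 (List.mem_of_mem_filter hin)⟩
          · obtain ⟨h1, h2⟩ := hbound j (List.mem_of_mem_filter hj)
            refine ⟨h1, h2, fun hin => ?_⟩
            have hd1 := (List.mem_filter.mp hj).2
            have hd2 := (List.mem_filter.mp hin).2
            simp at hd1 hd2
            rw [hd1] at hd2
            exact Bool.false_ne_true hd2
        · -- hpart'
          intro j hj0 hjl
          rcases hpart j hj0 hjl with hj | hj
          · exact Or.inl (by rw [PySem.Set.mem_update]; exact Or.inl hj)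
          · by_cases hd : pvDecB kps j = true
            · exact Or.inr (List.mem_filter.mpr ⟨hj, hd⟩)
            · refine Or.inl ?_
              rw [PySem.Set.mem_update]
              exact Or.inr (List.mem_filter.mpr ⟨hj, by simp [hd]⟩)
    · simp [h]

theorem pv_final (sequences : List String) : search_k sequences = search_k_alt sequences := by
  unfold search_k search_k_alt
  cases hmin : PySem.List.min? (sequences.map PySem.Str.len) (fun x => x) with
  | none => rfl
  | some shortest =>
    apply pv_loop_eq sequences (shortest - 1).toNat 1 shortest PySem.Set.empty
      (PySem.List.pyRange 0 (sequences.length : Int)) (le_refl _)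
    · have hcast : ((sequences.length : Nat) : Int) = (sequences.length : Int) := rfl
      rw [← hcast, PySem.List.pyRange_zero_natCast]
      exact List.pairwise_lt_range.map _ (fun a b h => by exact_mod_cast h)
    · intro j hj
      rwa [PySem.List.mem_pyRange_one] at hj
    · intro j hj
      simp [PySem.Set.empty] at hj
    · intro j h0 hl
      right
      rw [PySem.List.mem_pyRange_one]
      exact ⟨h0, hl⟩

-- ===== VERDICT (by name: the statement is the Claim_ definition above) =====
theorem search_k_spec : Claim_equal_search_k := by
  intro sequences _ _
  unfold Spec_search_k
  exact pv_final sequences
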